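-- pv_equiv track=rewrite | github.com/DishaDebAmin/5mds-project | intelligent_color_suggester.py | _get_color_family
-- ===== SOURCE A (Python) =====
-- def _get_color_family(hex_color):
--     """Get the color family name from hex"""
--     color_families = {
--         'red': ['#FF6B6B', '#E74C3C', '#C0392B', '#FF4757'],
--         'blue': ['#3498DB', '#2980B9', '#1ABC9C', '#74B9FF'],
--         'green': ['#27AE60', '#2ECC71', '#1ABC9C', '#55E6C1'],
--         'yellow': ['#F1C40F', '#F39C12', '#E67E22', '#FF9FF3'],
--         'purple': ['#9B59B6', '#8E44AD', '#6C5CE7', '#A29BFE'],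
--         'orange': ['#E67E22', '#D35400', '#F39C12', '#FF7979'],
--         'pink': ['#F8B195', '#F67280', '#C06C84', '#FD79A8'],
--         'black': ['#2C3E50', '#34495E', '#2D3436', '#636E72']
--     }
--
--     for family, colors in color_families.items():
--         if hex_color.upper() in [c.upper() for c in colors]:
--             return family
--
--     return 'professional'
-- ===== SOURCE B (Python) =====
-- # B: positional arithmetic over one flat palette — list.index + i // 4, no dict, no scanning loops.
-- _PALETTE = ['#FF6B6B', '#E74C3C', '#C0392B', '#FF4757',
--             '#3498DB', '#2980B9', '#1ABC9C', '#74B9FF',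
--             '#27AE60', '#2ECC71', '#1ABC9C', '#55E6C1',
--             '#F1C40F', '#F39C12', '#E67E22', '#FF9FF3',
--             '#9B59B6', '#8E44AD', '#6C5CE7', '#A29BFE',
--             '#E67E22', '#D35400', '#F39C12', '#FF7979',
--             '#F8B195', '#F67280', '#C06C84', '#FD79A8',
--             '#2C3E50', '#34495E', '#2D3436', '#636E72']
-- _FAMILIES = ['red', 'blue', 'green', 'yellow', 'purple', 'orange', 'pink', 'black']
--
-- def _get_color_family(hex_color):
--     """Get the color family name from hex"""
--     try:
--         i = _PALETTE.index(hex_color.upper())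
--     except ValueError:
--         return 'professional'
--     return _FAMILIES[i // 4]
-- ===== Notes on version B (the rewrite author's own statement) =====
-- stated objective: alternative
-- what changed: B replaces A's per-family scan of eight uppercased lists by positional arithmetic on one flat palette list: list.index finds the first occurrence (so the duplicate '#1ABC9C' resolves to 'blue') and the family is read off as _FAMILIES[i // 4]; no dict and no query-time loop over families.
import Mathlib
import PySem

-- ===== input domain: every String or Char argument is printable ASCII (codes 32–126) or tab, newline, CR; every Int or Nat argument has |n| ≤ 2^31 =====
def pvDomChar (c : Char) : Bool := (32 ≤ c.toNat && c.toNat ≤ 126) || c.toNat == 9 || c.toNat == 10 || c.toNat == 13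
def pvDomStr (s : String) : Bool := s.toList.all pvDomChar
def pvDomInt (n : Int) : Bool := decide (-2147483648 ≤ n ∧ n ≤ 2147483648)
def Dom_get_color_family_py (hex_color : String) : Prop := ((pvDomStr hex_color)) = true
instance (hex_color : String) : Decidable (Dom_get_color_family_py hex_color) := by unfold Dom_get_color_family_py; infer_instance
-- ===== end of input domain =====

-- B replaces A's per-family membership scan by positional arithmetic on one flat palette
-- (list.index, then family = _FAMILIES[i // 4]); same values on every input (alternative).

-- ===== PORT A =====
-- the color_families dict of A, as an insertion-ordered association list
def pvFamilies : List (String × List String) :=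
  [("red", ["#FF6B6B", "#E74C3C", "#C0392B", "#FF4757"]),
   ("blue", ["#3498DB", "#2980B9", "#1ABC9C", "#74B9FF"]),
   ("green", ["#27AE60", "#2ECC71", "#1ABC9C", "#55E6C1"]),
   ("yellow", ["#F1C40F", "#F39C12", "#E67E22", "#FF9FF3"]),
   ("purple", ["#9B59B6", "#8E44AD", "#6C5CE7", "#A29BFE"]),
   ("orange", ["#E67E22", "#D35400", "#F39C12", "#FF7979"]),
   ("pink", ["#F8B195", "#F67280", "#C06C84", "#FD79A8"]),
   ("black", ["#2C3E50", "#34495E", "#2D3436", "#636E72"])]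

-- the 'for family, colors in … : if hex_color.upper() in […]: return family' loop
def pvLoopA : List (String × List String) → String → String
  | [], _ => "professional"
  | (family, colors) :: rest, hx =>
      if hx ∈ colors.map PySem.Str.upper then family else pvLoopA rest hx

def get_color_family_py (hex_color : String) : String :=
  pvLoopA pvFamilies (PySem.Str.upper hex_color)

-- ===== PORT B =====
-- _PALETTE and _FAMILIES, the module constants of Source B
def pvPalette : List String :=
  ["#FF6B6B", "#E74C3C", "#C0392B", "#FF4757",
   "#3498DB", "#2980B9", "#1ABC9C", "#74B9FF",
   "#27AE60", "#2ECC71", "#1ABC9C", "#55E6C1",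
   "#F1C40F", "#F39C12", "#E67E22", "#FF9FF3",
   "#9B59B6", "#8E44AD", "#6C5CE7", "#A29BFE",
   "#E67E22", "#D35400", "#F39C12", "#FF7979",
   "#F8B195", "#F67280", "#C06C84", "#FD79A8",
   "#2C3E50", "#34495E", "#2D3436", "#636E72"]

def pvFams8 : List String :=
  ["red", "blue", "green", "yellow", "purple", "orange", "pink", "black"]

-- try: i = _PALETTE.index(hex_color.upper())  except ValueError: return 'professional'
-- return _FAMILIES[i // 4]   (index? gives i < 32, so i // 4 < 8: the getD "" default is unreachable)
def get_color_family_py_alt (hex_color : String) : String :=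
  match PySem.List.index? pvPalette (PySem.Str.upper hex_color) with
  | none => "professional"
  | some i => (PySem.List.pyGet? pvFams8 (PySem.Int.floordiv (i : Int) 4)).getD ""

-- ===== PRECONDITION & SPEC =====
def Spec_get_color_family_py (hex_color : String) (out : String) : Prop := out = get_color_family_py_alt hex_color
instance (hex_color : String) (out : String) : Decidable (Spec_get_color_family_py hex_color out) := by unfold Spec_get_color_family_py; infer_instance

-- ===== CLAIM (what is proved, stated in full; the proofs are below) =====
def Claim_equal_get_color_family_py : Prop := ∀ (hex_color : String), Dom_get_color_family_py hex_color → Spec_get_color_family_py hex_color (get_color_family_py hex_color)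

-- ===== LEMMAS AND PROOFS =====

-- all colors of all families, uppercased, in A's scan order (= pvPalette; checked in pv_keys below)
def pvAllColors : List String :=
  pvFamilies.flatMap (fun fc => fc.2.map PySem.Str.upper)

lemma pv_keys : pvAllColors = pvPalette := by decide

-- when u matches no color at all, A's loop falls through to 'professional'
lemma pvLoopA_of_not_mem (fams : List (String × List String)) (u : String)
    (h : u ∉ fams.flatMap (fun fc => fc.2.map PySem.Str.upper)) :
    pvLoopA fams u = "professional" := by
  induction fams with
  | nil => rfl
  | cons fc rest ih =>
    obtain ⟨family, colors⟩ := fc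
    simp only [List.flatMap_cons, List.mem_append] at h
    push Not at h
    simp only [pvLoopA, if_neg h.1]
    exact ih h.2

-- the core equivalence, for an arbitrary (already uppercased) query string u
lemma pv_core (u : String) :
    pvLoopA pvFamilies u =
      (match PySem.List.index? pvPalette u with
        | none => "professional"
        | some i => (PySem.List.pyGet? pvFams8 (PySem.Int.floordiv (i : Int) 4)).getD "") := by
  by_cases hmem : u ∈ pvPalette
  · -- u is one of the 31 distinct palette literals: finish each case by evaluation
    simp only [pvPalette, List.mem_cons, List.not_mem_nil, or_false] at hmem
    rcases hmem with rfl | rfl | rfl | rfl | rfl | rfl | rfl | rfl | rfl | rfl | rfl | rfl |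
      rfl | rfl | rfl | rfl | rfl | rfl | rfl | rfl | rfl | rfl | rfl | rfl | rfl | rfl |
      rfl | rfl | rfl | rfl | rfl | rfl <;> decide
  · -- u is in no family: both sides are 'professional'
    rw [(PySem.List.index?_eq_none_iff ..).mpr hmem]
    exact pvLoopA_of_not_mem pvFamilies u (by rw [show pvFamilies.flatMap (fun fc => fc.2.map PySem.Str.upper) = pvAllColors from rfl, pv_keys]; exact hmem)

-- ===== VERDICT (by name: the statement is the Claim_ definition above) =====
theorem get_color_family_py_spec : Claim_equal_get_color_family_py := by
  intro hex_color _
  unfold Spec_get_color_family_py get_color_family_py get_color_family_py_alt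
  exact pv_core (PySem.Str.upper hex_color)
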